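-- pv_equiv track=rewrite | github.com/jluttine/junction-tree | junctiontree/beliefpropagation.py | identify_cliques
-- ===== SOURCE A (Python) =====
-- def identify_cliques(induced_clusters):
--     ''' Generate maximal cliques from induced clusters
--
--         A clique may be composed of multiple factors. See:
--         http://www.stat.washington.edu/courses/stat535/fall11/Handouts/l5-decomposable.pdf
--
--         :param induced_clusters: list of clusters generated when finding graph triangulation
--         :return: list of maximal cliques where each maximal clique is a list of key indices it contains:
--
--         [clique1, ..., cliqueK]
--
--         That is, if there are N keys, each clique contains some subset of numbers from {0, ..., N-1}
--         as a tuple/list.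
--
--     '''
--
--     # only retain clusters that are not a subset of another cluster
--     sets=[frozenset(c) for c in induced_clusters]
--     cliques=[]
--     for s1 in sets:
--         if any(s1 < s2 for s2 in sets):
--             continue
--         else:
--             cliques.append(sorted(s1))
--
--
--     return cliques
-- ===== SOURCE B (Python) =====
-- def identify_cliques(induced_clusters):
--     ''' Generate maximal cliques from induced clusters (see a.py docstring).
--
--         One streaming pass: maintain the list of clusters that are maximal
--         among those seen so far; a new cluster is dropped if it is a strict
--         subset of a current candidate, and otherwise evicts every candidate
--         that is itself a strict subset of it.  Input order of survivors is preserved.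
--     '''
--     candidates = []
--     for c in induced_clusters:
--         s = frozenset(c)
--         if any(s < m for m in candidates):
--             continue
--         candidates = [m for m in candidates if not m < s]
--         candidates.append(s)
--     return [sorted(s) for s in candidates]
-- ===== Notes on version B (the rewrite author's own statement) =====
-- stated objective: alternative
-- what changed: Instead of testing every cluster against the full list of all clusters, B makes one streaming pass that maintains only the clusters maximal so far, dropping a new set dominated by a candidate and evicting candidates the new set strictly contains.
import Mathlib
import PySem

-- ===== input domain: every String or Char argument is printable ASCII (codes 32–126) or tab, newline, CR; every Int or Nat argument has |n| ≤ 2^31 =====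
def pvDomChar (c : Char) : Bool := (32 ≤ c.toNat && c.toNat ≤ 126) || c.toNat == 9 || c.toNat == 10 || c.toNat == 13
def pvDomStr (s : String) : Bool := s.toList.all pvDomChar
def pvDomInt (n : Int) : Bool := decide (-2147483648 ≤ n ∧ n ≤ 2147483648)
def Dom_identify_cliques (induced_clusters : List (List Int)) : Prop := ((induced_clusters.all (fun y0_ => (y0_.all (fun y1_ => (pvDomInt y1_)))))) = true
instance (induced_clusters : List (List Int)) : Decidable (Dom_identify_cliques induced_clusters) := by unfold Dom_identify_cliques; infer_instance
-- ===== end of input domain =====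

-- B replaces A's scan of every cluster against the full list by one streaming pass that
-- keeps only the clusters maximal so far (alternative decomposition, same result).

-- shared helper: Python's 'a < b' on frozensets (proper subset)
def pyLtSet (a b : PySem.Set Int) : Bool :=
  PySem.Set.issubset a b && !(PySem.Set.equal a b)

-- ===== PORT A =====
def identify_cliques (induced_clusters : List (List Int)) : List (List Int) :=
  let sets := induced_clusters.map (fun c => PySem.Set.ofList c)
  sets.foldl (fun cliques s1 =>
    if sets.any (fun s2 => pyLtSet s1 s2) then cliques
    else cliques ++ [PySem.List.sorted s1 (fun x => x) false]) []

-- ===== PORT B =====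
def identify_cliques_alt (induced_clusters : List (List Int)) : List (List Int) :=
  (induced_clusters.foldl (fun cands c =>
      let s := PySem.Set.ofList c
      if cands.any (fun m => pyLtSet s m) then cands
      else cands.filter (fun m => !(pyLtSet m s)) ++ [s]) []).map
    (fun s => PySem.List.sorted s (fun x => x) false)

-- ===== PRECONDITION & SPEC =====
def Spec_identify_cliques (induced_clusters : List (List Int)) (out : List (List Int)) : Prop := out = identify_cliques_alt induced_clusters
instance (induced_clusters : List (List Int)) (out : List (List Int)) : Decidable (Spec_identify_cliques induced_clusters out) := by unfold Spec_identify_cliques; infer_instance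

-- ===== CLAIM (what is proved, stated in full; the proofs are below) =====
def Claim_equal_identify_cliques : Prop := ∀ (induced_clusters : List (List Int)), Dom_identify_cliques induced_clusters → Spec_identify_cliques induced_clusters (identify_cliques induced_clusters)

-- ===== LEMMAS AND PROOFS =====

-- "s is maximal within S": no proper superset of s occurs in S
def maxIn (S : List (PySem.Set Int)) (s : PySem.Set Int) : Bool :=
  !(S.any (fun t => pyLtSet s t))

-- the maximal elements of S, in order
def gres (S : List (PySem.Set Int)) : List (PySem.Set Int) :=
  S.filter (maxIn S)

lemma pyLtSet_iff (a b : PySem.Set Int) :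
    pyLtSet a b = true ↔ (∀ x ∈ a, x ∈ b) ∧ ¬(∀ x, x ∈ a ↔ x ∈ b) := by
  unfold pyLtSet
  rw [Bool.and_eq_true, Bool.not_eq_true', PySem.Set.issubset_iff]
  constructor
  · rintro ⟨h1, h2⟩
    refine ⟨h1, fun hiff => ?_⟩
    rw [(PySem.Set.equal_iff a b).mpr hiff] at h2
    exact Bool.true_eq_false.mp h2
  · rintro ⟨h1, h2⟩
    refine ⟨h1, ?_⟩
    cases hv : PySem.Set.equal a b with
    | false => rfl
    | true => exact absurd ((PySem.Set.equal_iff a b).mp hv) h2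

lemma pyLtSet_irrefl (a : PySem.Set Int) : pyLtSet a a = false := by
  have h : PySem.Set.equal a a = true := (PySem.Set.equal_iff a a).mpr (fun _ => Iff.rfl)
  simp [pyLtSet, h]

lemma issubset_refl (a : PySem.Set Int) : PySem.Set.issubset a a = true :=
  (PySem.Set.issubset_iff a a).mpr (fun _ hx => hx)

lemma issubset_trans {a b c : PySem.Set Int} (h1 : PySem.Set.issubset a b = true)
    (h2 : PySem.Set.issubset b c = true) : PySem.Set.issubset a c = true := by
  rw [PySem.Set.issubset_iff] at *
  exact fun x hx => h2 x (h1 x hx)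

lemma pyLtSet_of_lt_of_subset {a b c : PySem.Set Int} (h1 : pyLtSet a b = true)
    (h2 : PySem.Set.issubset b c = true) : pyLtSet a c = true := by
  rw [pyLtSet_iff] at *
  rw [PySem.Set.issubset_iff] at h2
  obtain ⟨hab, hne⟩ := h1
  refine ⟨fun x hx => h2 x (hab x hx), fun hac => ?_⟩
  exact hne (fun x => ⟨fun hx => hab x hx, fun hx => (hac x).mpr (h2 x hx)⟩)

lemma pyLtSet_trans {a b c : PySem.Set Int} (h1 : pyLtSet a b = true)
    (h2 : pyLtSet b c = true) : pyLtSet a c = true := by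
  apply pyLtSet_of_lt_of_subset h1
  rw [pyLtSet_iff] at h2
  exact (PySem.Set.issubset_iff b c).mpr h2.1

lemma pyLtSet_length {a b : PySem.Set Int} (ha : a.Nodup) (hb : b.Nodup)
    (h : pyLtSet a b = true) : a.length < b.length := by
  rw [pyLtSet_iff] at h
  obtain ⟨hab, hne⟩ := h
  have hsub : a.toFinset ⊆ b.toFinset := by
    intro x hx
    exact List.mem_toFinset.mpr (hab x (List.mem_toFinset.mp hx))
  have hss : a.toFinset ⊂ b.toFinset := by
    refine Finset.ssubset_iff_subset_ne.mpr ⟨hsub, fun he => ?_⟩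
    exact hne (fun x => by
      constructor
      · intro hx; exact hab x hx
      · intro hx
        have : x ∈ a.toFinset := he ▸ List.mem_toFinset.mpr hx
        exact List.mem_toFinset.mp this)
  have := Finset.card_lt_card hss
  rwa [List.toFinset_card_of_nodup ha, List.toFinset_card_of_nodup hb] at this

lemma len_le_foldr_max {u : PySem.Set Int} {S : List (PySem.Set Int)} (h : u ∈ S) :
    u.length ≤ (S.map List.length).foldr max 0 := by
  induction S with
  | nil => simp at h
  | cons x xs ih =>
    simp only [List.map_cons, List.foldr_cons]
    rcases List.mem_cons.mp h with rfl | h'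
    · exact Nat.le_max_left _ _
    · exact le_trans (ih h') (Nat.le_max_right _ _)

lemma dominated_aux : ∀ (k : ℕ) (S : List (PySem.Set Int)), (∀ u ∈ S, u.Nodup) →
    ∀ t ∈ S, (S.map List.length).foldr max 0 - t.length ≤ k →
    ∃ m ∈ S, maxIn S m = true ∧ PySem.Set.issubset t m = true := by
  intro k
  induction k with
  | zero =>
    intro S hN t ht hk
    by_cases h : maxIn S t = true
    · exact ⟨t, ht, h, issubset_refl t⟩
    · exfalso
      simp only [maxIn, Bool.not_eq_true', Bool.not_eq_false, List.any_eq_true] at h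
      obtain ⟨u, hu, hlt⟩ := h
      have h1 := pyLtSet_length (hN t ht) (hN u hu) hlt
      have h2 := len_le_foldr_max hu
      omega
  | succ k ih =>
    intro S hN t ht hk
    by_cases h : maxIn S t = true
    · exact ⟨t, ht, h, issubset_refl t⟩
    · simp only [maxIn, Bool.not_eq_true', Bool.not_eq_false, List.any_eq_true] at h
      obtain ⟨u, hu, hlt⟩ := h
      have h1 := pyLtSet_length (hN t ht) (hN u hu) hlt
      have h2 := len_le_foldr_max hu
      obtain ⟨m, hm, hmax, hsub⟩ := ih S hN u hu (by omega)
      have htu : PySem.Set.issubset t u = true :=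
        (PySem.Set.issubset_iff t u).mpr ((pyLtSet_iff t u).mp hlt).1
      exact ⟨m, hm, hmax, issubset_trans htu hsub⟩

-- every element of S is contained in some maximal element of S
lemma dominated (S : List (PySem.Set Int)) (hN : ∀ u ∈ S, u.Nodup)
    {t : PySem.Set Int} (ht : t ∈ S) :
    ∃ m ∈ S, maxIn S m = true ∧ PySem.Set.issubset t m = true :=
  dominated_aux ((S.map List.length).foldr max 0) S hN t ht (Nat.sub_le _ _)

lemma anyLt_gres_iff (S : List (PySem.Set Int)) (hN : ∀ u ∈ S, u.Nodup)
    (s : PySem.Set Int) :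
    (gres S).any (fun m => pyLtSet s m) = true ↔ ∃ t ∈ S, pyLtSet s t = true := by
  constructor
  · intro h
    obtain ⟨m, hm, hlt⟩ := List.any_eq_true.mp h
    exact ⟨m, (List.mem_filter.mp hm).1, hlt⟩
  · rintro ⟨t, ht, hlt⟩
    obtain ⟨m, hm, hmax, hsub⟩ := dominated S hN ht
    exact List.any_eq_true.mpr ⟨m, List.mem_filter.mpr ⟨hm, hmax⟩,
      pyLtSet_of_lt_of_subset hlt hsub⟩

lemma maxIn_append (S : List (PySem.Set Int)) (s u : PySem.Set Int) :
    maxIn (S ++ [s]) u = (maxIn S u && !(pyLtSet u s)) := by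
  simp [maxIn, List.any_append, Bool.not_or]

lemma step_gres (S : List (PySem.Set Int)) (hN : ∀ u ∈ S, u.Nodup)
    (s : PySem.Set Int) :
    (if (gres S).any (fun m => pyLtSet s m) then gres S
     else (gres S).filter (fun m => !(pyLtSet m s)) ++ [s]) = gres (S ++ [s]) := by
  have hfa : gres (S ++ [s]) =
      S.filter (maxIn (S ++ [s])) ++ [s].filter (maxIn (S ++ [s])) := by
    simp [gres, List.filter_append]
  by_cases h : (gres S).any (fun m => pyLtSet s m) = true
  · rw [if_pos h, hfa]
    obtain ⟨m, hmf, hlt⟩ := List.any_eq_true.mp h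
    obtain ⟨hmS, hmax⟩ := List.mem_filter.mp hmf
    have hs_not : maxIn (S ++ [s]) s = false := by
      have hany : ((S ++ [s]).any fun t => pyLtSet s t) = true :=
        List.any_eq_true.mpr ⟨m, List.mem_append_left _ hmS, hlt⟩
      simp [maxIn, hany]
    have hcong : S.filter (maxIn (S ++ [s])) = S.filter (maxIn S) := by
      apply List.filter_congr
      intro u hu
      rw [maxIn_append]
      cases hmu : maxIn S u with
      | false => simp
      | true =>
        simp only [Bool.true_and]
        have : pyLtSet u s = false := by
          by_contra hc
          have hus : pyLtSet u s = true := by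
            cases hval : pyLtSet u s with
            | false => exact absurd hval hc
            | true => rfl
          have hum : pyLtSet u m = true := pyLtSet_trans hus hlt
          have : (List.any S fun t => pyLtSet u t) = true :=
            List.any_eq_true.mpr ⟨m, hmS, hum⟩
          simp [maxIn, this] at hmu
        simp [this]
    rw [hcong]
    simp [gres, List.filter, hs_not]
  · rw [if_neg h, hfa]
    have hnone : ∀ t ∈ S, pyLtSet s t = false := by
      intro t ht
      cases hval : pyLtSet s t with
      | false => rfl
      | true => exact absurd ((anyLt_gres_iff S hN s).mpr ⟨t, ht, hval⟩) h
    have hs_max : maxIn (S ++ [s]) s = true := by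
      simp only [maxIn, Bool.not_eq_true', List.any_eq_false]
      intro t ht
      rcases List.mem_append.mp ht with h1 | h1
      · simp [hnone t h1]
      · simp [List.mem_singleton.mp h1, pyLtSet_irrefl]
    have hcong : S.filter (maxIn (S ++ [s])) =
        (S.filter (maxIn S)).filter (fun m => !(pyLtSet m s)) := by
      rw [List.filter_filter]
      apply List.filter_congr
      intro u _
      rw [maxIn_append, Bool.and_comm]
    rw [hcong]
    simp [gres, List.filter, hs_max]

lemma foldB_eq_gres (l : List (List Int)) :
    l.foldl (fun cands c =>
      let s := PySem.Set.ofList c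
      if cands.any (fun m => pyLtSet s m) then cands
      else cands.filter (fun m => !(pyLtSet m s)) ++ [s]) []
    = gres (l.map (fun c => PySem.Set.ofList c)) := by
  induction l using List.reverseRecOn with
  | nil => rfl
  | append_singleton l c ih =>
    rw [List.foldl_append, List.map_append, ih]
    exact step_gres (l.map (fun c => PySem.Set.ofList c))
      (fun u hu => by
        obtain ⟨c', _, rfl⟩ := List.mem_map.mp hu
        exact PySem.Set.nodup_ofList c') (PySem.Set.ofList c)

lemma flip_if_foldl (p : PySem.Set Int → Bool) (f : PySem.Set Int → List Int) :
    ∀ (S : List (PySem.Set Int)) (acc : List (List Int)),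
    S.foldl (fun acc s => if p s then acc else acc ++ [f s]) acc
      = acc ++ (S.filter (fun s => !p s)).map f := by
  intro S
  induction S with
  | nil => intro acc; simp
  | cons x xs ih =>
    intro acc
    cases h : p x with
    | false => simp [h, ih]
    | true => simp [h, ih]

lemma foldA_eq_gres (l : List (List Int)) :
    identify_cliques l = (gres (l.map (fun c => PySem.Set.ofList c))).map
      (fun s => PySem.List.sorted s (fun x => x) false) := by
  unfold identify_cliques
  rw [flip_if_foldl]
  simp only [gres, List.nil_append]
  congr 1

-- ===== VERDICT (by name: the statement is the Claim_ definition above) =====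
theorem identify_cliques_spec : Claim_equal_identify_cliques := by
  intro l _
  unfold Spec_identify_cliques identify_cliques_alt
  rw [foldB_eq_gres, foldA_eq_gres]
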